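-- pv_equiv track=rewrite | github.com/enferas/qtimigration | tags/pyslet-0.2.20110608/pyslet/rfc2396.py | SplitServer
-- ===== SOURCE A (Python) =====
-- def IsDigit(c):
-- 	return c and (ord(c)>=0x30 and ord(c)<=0x39)
--
-- def SplitServer(authority):
-- 	userinfo=None
-- 	host=None
-- 	port=None
-- 	if authority is not None:
-- 		if authority:
-- 			mode=None
-- 			pos=0
-- 			while True:
-- 				if pos<len(authority):
-- 					c=authority[pos]
-- 				else:
-- 					c=None
-- 				if mode is None:
-- 					if c is None:
-- 						host=authority
-- 						break
-- 					elif ord(c)==0x40: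
-- 						userinfo=authority[:pos]
-- 						mode='h'
-- 						hStart=pos+1
-- 					elif ord(c)==0x3A:
-- 						# could be in userinfo or start of port
-- 						host=authority[:pos]
-- 						mode='p'
-- 						pStart=pos+1
-- 					pos+=1
-- 				elif mode=='h':
-- 					if c is None:
-- 						host=authority[hStart:]
-- 						break
-- 					elif ord(c)==0x3A:
-- 						host=authority[hStart:pos]
-- 						mode='p'
-- 						pStart=pos+1
-- 					pos+=1
-- 				elif mode=='p':
-- 					if c is None:
-- 						port=authority[pStart:]
-- 						break
-- 					elif ord(c)==0x40 and userinfo is None: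
-- 						# must have been username:pass@
-- 						userinfo=authority[:pos]
-- 						host=None
-- 						mode='h'
-- 						hStart=pos+1
-- 					elif not IsDigit(c):
-- 						if userinfo is None:
-- 							# probably username:pass...
-- 							host=None
-- 							mode='u'
-- 						else:
-- 							# userinfo@host:123XX - bad port, stop parsing
-- 							port=authority[pStart:pos]
-- 							break
-- 					pos+=1
-- 				elif mode=='u':
-- 					# username:pass...
-- 					if c is None:
-- 						userinfo=authority
-- 						host=''
-- 						break
-- 					elif ord(c)==0x40:
-- 						userinfo=authority[:pos]
-- 						mode='h'
-- 						hStart=pos+1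
-- 					pos+=1
-- 		else:
-- 			host=''
-- 	return userinfo,host,port
-- ===== SOURCE B (Python) =====
-- def _digit_prefix(t):
--     # longest leading run of ASCII digits in t
--     p = []
--     for c in t:
--         if '0' <= c <= '9':
--             p.append(c)
--         else:
--             break
--     return ''.join(p)
--
-- def SplitServer(authority):
--     if authority is None:
--         return (None, None, None)
--     if not authority:
--         return (None, '', None)
--     if '@' in authority:
--         userinfo, rest = authority.split('@', 1)
--         if ':' in rest:
--             host, tail = rest.split(':', 1)
--             return (userinfo, host, _digit_prefix(tail))
--         return (userinfo, rest, None)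
--     if ':' in authority:
--         host, tail = authority.split(':', 1)
--         if all('0' <= c <= '9' for c in tail):
--             return (None, host, tail)
--         return (authority, '', None)
--     return (None, authority, None)
-- ===== Notes on version B (the rewrite author's own statement) =====
-- stated objective: simpler
-- what changed: A's four-mode character-at-a-time state machine (with backtracking via mode changes) is replaced by up-front whole-string splits at the first at-sign and first colon plus a leading-digit-run scan / all-digits check.
import Mathlib
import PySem

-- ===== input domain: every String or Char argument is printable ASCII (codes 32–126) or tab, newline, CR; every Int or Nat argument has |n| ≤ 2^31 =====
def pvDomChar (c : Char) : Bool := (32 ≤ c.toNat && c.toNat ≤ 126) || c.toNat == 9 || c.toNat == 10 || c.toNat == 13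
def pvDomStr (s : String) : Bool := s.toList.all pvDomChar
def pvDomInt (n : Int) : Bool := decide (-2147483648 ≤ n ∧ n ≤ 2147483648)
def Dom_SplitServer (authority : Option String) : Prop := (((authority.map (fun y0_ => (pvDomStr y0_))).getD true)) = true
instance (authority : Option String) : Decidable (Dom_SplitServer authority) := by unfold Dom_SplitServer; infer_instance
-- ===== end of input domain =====

-- B replaces A's four-mode character-at-a-time state machine by up-front whole-string splits
-- at the first at-sign / first colon plus a digit-run scan; objective: simpler (the timing
-- run also measured B faster by a constant factor).

-- ===== PORT A =====
-- A's helper IsDigit(c): a one-char string is always truthy, so this is the ASCII 0x30..0x39 test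
def pvIsDigitA (c : Char) : Bool := decide (0x30 ≤ c.toNat ∧ c.toNat ≤ 0x39)

inductive PvMode where
  | m0 | mh | mp | mu
deriving DecidableEq, Repr

-- A's 'while True' loop over the char list s; pos/mode/hStart/pStart/userinfo/host are the
-- Python loop's state, each break returns the final (userinfo, host, port).  fuel counts the
-- remaining loop iterations; called with fuel = len(s)+1 the fuel-0 branch is unreachable
-- (pos grows by 1 per iteration and every mode breaks once pos = len(s)).
-- Python slices here are exact as take/drop: authority[:pos] = take pos, authority[hStart:] =
-- drop hStart, authority[hStart:pos] = (drop hStart).take (pos-hStart) — the indices are Nats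
-- with hStart ≤ pos, pStart ≤ pos on every call, so Python's slice clamping never differs.
def pvLoopA (s : List Char) (fuel pos : Nat) (mode : PvMode) (hStart pStart : Nat)
    (ui host : Option (List Char)) :
    Option (List Char) × Option (List Char) × Option (List Char) :=
  match fuel with
  | 0 => (ui, host, none)   -- unreachable
  | fuel + 1 =>
    match s[pos]? with
    | none =>
      match mode with
      | .m0 => (ui, some s, none)                               -- host=authority; break
      | .mh => (ui, some (s.drop hStart), none)                 -- host=authority[hStart:]; break
      | .mp => (ui, host, some (s.drop pStart))                 -- port=authority[pStart:]; break
      | .mu => (some s, some [], none)                          -- userinfo=authority; host=''; break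
    | some c =>
      match mode with
      | .m0 =>
        if c = '@' then pvLoopA s fuel (pos + 1) .mh (pos + 1) pStart (some (s.take pos)) host
        else if c = ':' then pvLoopA s fuel (pos + 1) .mp hStart (pos + 1) ui (some (s.take pos))
        else pvLoopA s fuel (pos + 1) .m0 hStart pStart ui host
      | .mh =>
        if c = ':' then pvLoopA s fuel (pos + 1) .mp hStart (pos + 1) ui (some ((s.drop hStart).take (pos - hStart)))
        else pvLoopA s fuel (pos + 1) .mh hStart pStart ui host
      | .mp =>
        if c = '@' ∧ ui = none then pvLoopA s fuel (pos + 1) .mh (pos + 1) pStart (some (s.take pos)) none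
        else if ¬ pvIsDigitA c then
          match ui with
          | none => pvLoopA s fuel (pos + 1) .mu hStart pStart none none
          | some u => (some u, host, some ((s.drop pStart).take (pos - pStart)))  -- bad port; break
        else pvLoopA s fuel (pos + 1) .mp hStart pStart ui host
      | .mu =>
        if c = '@' then pvLoopA s fuel (pos + 1) .mh (pos + 1) pStart (some (s.take pos)) host
        else pvLoopA s fuel (pos + 1) .mu hStart pStart ui host

def SplitServer (authority : Option String) : Option String × Option String × Option String :=
  match authority with
  | none => (none, none, none)
  | some a =>
    if a.toList = [] then (none, some "", none)       -- 'if authority:' false branch: host=''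
    else
      match pvLoopA a.toList (a.toList.length + 1) 0 .m0 0 0 none none with
      | (u, h, p) => (u.map String.ofList, h.map String.ofList, p.map String.ofList)

-- ===== PORT B =====
-- B's digit test '0' <= c <= '9'
def pvIsDigitB (c : Char) : Bool := decide ('0' ≤ c ∧ c ≤ '9')

-- _digit_prefix: longest leading run of ASCII digits
def pvDigitPrefix : List Char → List Char
  | [] => []
  | c :: cs => if pvIsDigitB c then c :: pvDigitPrefix cs else []

-- s.split(c, 1) for a one-char separator c occurring in s: (part before first c, part after it)
def pvSplitOnce (c : Char) (s : List Char) : List Char × List Char :=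
  (s.takeWhile (· ≠ c), (s.dropWhile (· ≠ c)).tail)

def SplitServer_alt (authority : Option String) : Option String × Option String × Option String :=
  match authority with
  | none => (none, none, none)
  | some a =>
    let s := a.toList
    if s = [] then (none, some "", none)
    else if '@' ∈ s then
      match pvSplitOnce '@' s with
      | (userinfo, rest) =>
        if ':' ∈ rest then
          match pvSplitOnce ':' rest with
          | (host, tail) => (some (String.ofList userinfo), some (String.ofList host), some (String.ofList (pvDigitPrefix tail)))
        else (some (String.ofList userinfo), some (String.ofList rest), none)
    else if ':' ∈ s then
      match pvSplitOnce ':' s with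
      | (host, tail) =>
        if tail.all pvIsDigitB then (none, some (String.ofList host), some (String.ofList tail))
        else (some (String.ofList s), some "", none)
    else (none, some (String.ofList s), none)

-- ===== PRECONDITION & SPEC =====
def Spec_SplitServer (authority : Option String) (out : Option String × Option String × Option String) : Prop := out = SplitServer_alt authority
instance (authority : Option String) (out : Option String × Option String × Option String) : Decidable (Spec_SplitServer authority out) := by unfold Spec_SplitServer; infer_instance

-- ===== CLAIM (what is proved, stated in full; the proofs are below) =====
def Claim_equal_SplitServer : Prop := ∀ (authority : Option String), Dom_SplitServer authority → Spec_SplitServer authority (SplitServer authority)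

-- ===== LEMMAS AND PROOFS =====

-- the two digit tests agree
theorem pvIsDigit_eq (c : Char) : pvIsDigitB c = pvIsDigitA c := by
  simp only [pvIsDigitA, pvIsDigitB]
  rw [decide_eq_decide, Char.le_def, Char.le_def, UInt32.le_iff_toNat_le, UInt32.le_iff_toNat_le]
  exact Iff.rfl

theorem pvDigitPrefix_eq (t : List Char) : pvDigitPrefix t = t.takeWhile pvIsDigitA := by
  induction t with
  | nil => rfl
  | cons c cs ih =>
    simp only [pvDigitPrefix, List.takeWhile_cons, pvIsDigit_eq, ih]

theorem pvIsDigitA_at : pvIsDigitA '@' = false := by decide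

-- outcome of A's loop once it is in mode 'h' (userinfo already set, host starts at hStart)
def pvHRes (u rest : List Char) :
    Option (List Char) × Option (List Char) × Option (List Char) :=
  (some u, some (rest.takeWhile (· ≠ ':')),
   if ':' ∈ rest then some (((rest.dropWhile (· ≠ ':')).tail).takeWhile pvIsDigitA) else none)

-- outcome of A's loop in mode 'u' (scanning for a '@'; pre = chars already passed)
def pvURes (pre t : List Char) :
    Option (List Char) × Option (List Char) × Option (List Char) :=
  if '@' ∈ t then pvHRes (pre ++ t.takeWhile (· ≠ '@')) ((t.dropWhile (· ≠ '@')).tail)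
  else (some (pre ++ t), some [], none)

-- outcome of A's loop in mode 'p' with userinfo = None (after 'host:'), digs = digits read so far
def pvPRes (fr digs t : List Char) (host : Option (List Char)) :
    Option (List Char) × Option (List Char) × Option (List Char) :=
  match t.dropWhile pvIsDigitA with
  | [] => (none, host, some (digs ++ t))
  | c :: r1 =>
    if c = '@' then pvHRes (fr ++ digs ++ t.takeWhile pvIsDigitA) r1
    else pvURes (fr ++ digs ++ t.takeWhile pvIsDigitA ++ [c]) r1

-- neither '@' nor ':'
def pvP0 (c : Char) : Bool := ¬(c = '@' ∨ c = ':')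

-- outcome of A's loop in the initial mode (pre = chars already passed, none special)
def pvMRes (pre t : List Char) :
    Option (List Char) × Option (List Char) × Option (List Char) :=
  match t.dropWhile pvP0 with
  | [] => (none, some (pre ++ t), none)
  | c :: r =>
    if c = '@' then pvHRes (pre ++ t.takeWhile pvP0) r
    else pvPRes (pre ++ t.takeWhile pvP0 ++ [c]) [] r (some (pre ++ t.takeWhile pvP0))

theorem pvGetNone (l : List Char) (n : Nat) (h : l.length = n) : l[n]? = none := by
  rw [List.getElem?_eq_none]; omega

theorem pvGetHead (l r : List Char) (c : Char) (n : Nat) (h : l.length = n) :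
    (l ++ c :: r)[n]? = some c := by
  subst h; rw [List.getElem?_append_right (Nat.le_refl _)]; simp

theorem pvAllSnoc {P : Char → Prop} {l : List Char} {c : Char}
    (h : ∀ x ∈ l, P x) (hc : P c) : ∀ x ∈ l ++ [c], P x := by
  intro x hx
  rcases List.mem_append.1 hx with h' | h'
  · exact h x h'
  · simp only [List.mem_singleton] at h'; subst h'; exact hc

theorem pvLenSnoc (a : List Char) (c : Char) (n : Nat) :
    n + a.length + 1 = n + (a ++ [c]).length := by
  simp only [List.length_append, List.length_cons, List.length_nil]; omega

-- one-step unfoldings of pvLoopA (break lemmas and step lemmas, one per mode)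
theorem pvStepNone_m0 {s : List Char} {pos : Nat} (fuel hS pS : Nat) (ui host : Option (List Char))
    (h : s[pos]? = none) : pvLoopA s (fuel + 1) pos .m0 hS pS ui host = (ui, some s, none) := by
  rw [pvLoopA.eq_def]; simp only [h]

theorem pvStepNone_mh {s : List Char} {pos : Nat} (fuel hS pS : Nat) (ui host : Option (List Char))
    (h : s[pos]? = none) : pvLoopA s (fuel + 1) pos .mh hS pS ui host = (ui, some (s.drop hS), none) := by
  rw [pvLoopA.eq_def]; simp only [h]

theorem pvStepNone_mp {s : List Char} {pos : Nat} (fuel hS pS : Nat) (ui host : Option (List Char))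
    (h : s[pos]? = none) : pvLoopA s (fuel + 1) pos .mp hS pS ui host = (ui, host, some (s.drop pS)) := by
  rw [pvLoopA.eq_def]; simp only [h]

theorem pvStepNone_mu {s : List Char} {pos : Nat} (fuel hS pS : Nat) (ui host : Option (List Char))
    (h : s[pos]? = none) : pvLoopA s (fuel + 1) pos .mu hS pS ui host = (some s, some [], none) := by
  rw [pvLoopA.eq_def]; simp only [h]

theorem pvStepSome_m0 {s : List Char} {pos : Nat} {c : Char} (fuel hS pS : Nat)
    (ui host : Option (List Char)) (h : s[pos]? = some c) :
    pvLoopA s (fuel + 1) pos .m0 hS pS ui host =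
      (if c = '@' then pvLoopA s fuel (pos + 1) .mh (pos + 1) pS (some (s.take pos)) host
       else if c = ':' then pvLoopA s fuel (pos + 1) .mp hS (pos + 1) ui (some (s.take pos))
       else pvLoopA s fuel (pos + 1) .m0 hS pS ui host) := by
  rw [pvLoopA.eq_def]; simp only [h]

theorem pvStepSome_mh {s : List Char} {pos : Nat} {c : Char} (fuel hS pS : Nat)
    (ui host : Option (List Char)) (h : s[pos]? = some c) :
    pvLoopA s (fuel + 1) pos .mh hS pS ui host =
      (if c = ':' then pvLoopA s fuel (pos + 1) .mp hS (pos + 1) ui (some ((s.drop hS).take (pos - hS)))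
       else pvLoopA s fuel (pos + 1) .mh hS pS ui host) := by
  rw [pvLoopA.eq_def]; simp only [h]

theorem pvStepSome_mp_some {s : List Char} {pos : Nat} {c : Char} (fuel hS pS : Nat)
    (u : List Char) (host : Option (List Char)) (h : s[pos]? = some c) :
    pvLoopA s (fuel + 1) pos .mp hS pS (some u) host =
      (if ¬ pvIsDigitA c then (some u, host, some ((s.drop pS).take (pos - pS)))
       else pvLoopA s fuel (pos + 1) .mp hS pS (some u) host) := by
  rw [pvLoopA.eq_def]; simp only [h]
  rw [if_neg (by simp)]

theorem pvStepSome_mp_none {s : List Char} {pos : Nat} {c : Char} (fuel hS pS : Nat)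
    (host : Option (List Char)) (h : s[pos]? = some c) :
    pvLoopA s (fuel + 1) pos .mp hS pS none host =
      (if c = '@' then pvLoopA s fuel (pos + 1) .mh (pos + 1) pS (some (s.take pos)) none
       else if ¬ pvIsDigitA c then pvLoopA s fuel (pos + 1) .mu hS pS none none
       else pvLoopA s fuel (pos + 1) .mp hS pS none host) := by
  rw [pvLoopA.eq_def]; simp only [h]
  by_cases hc : c = '@'
  · rw [if_pos (by simp [hc]), if_pos hc]
  · rw [if_neg (by simp [hc]), if_neg hc]

theorem pvStepSome_mu {s : List Char} {pos : Nat} {c : Char} (fuel hS pS : Nat)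
    (ui host : Option (List Char)) (h : s[pos]? = some c) :
    pvLoopA s (fuel + 1) pos .mu hS pS ui host =
      (if c = '@' then pvLoopA s fuel (pos + 1) .mh (pos + 1) pS (some (s.take pos)) host
       else pvLoopA s fuel (pos + 1) .mu hS pS ui host) := by
  rw [pvLoopA.eq_def]; simp only [h]

theorem pvLoopA_p_some (t : List Char) : ∀ (fr digs u : List Char)
    (host : Option (List Char)) (hS : Nat), (∀ c ∈ digs, pvIsDigitA c) →
    pvLoopA (fr ++ digs ++ t) (t.length + 1) (fr.length + digs.length) .mp hS fr.length (some u) host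
      = (some u, host, some (digs ++ t.takeWhile pvIsDigitA)) := by
  induction t with
  | nil =>
    intro fr digs u host hS hd
    rw [show ([] : List Char).length + 1 = 0 + 1 from rfl,
        pvStepNone_mp 0 hS fr.length _ host (pvGetNone _ _ (by simp))]
    simp [List.drop_left]
  | cons c t' ih =>
    intro fr digs u host hS hd
    have hget : (fr ++ digs ++ c :: t')[fr.length + digs.length]? = some c :=
      pvGetHead _ _ _ _ (by simp)
    rw [show (c :: t').length + 1 = t'.length + 1 + 1 from rfl,
        pvStepSome_mp_some (t'.length + 1) hS fr.length u host hget]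
    by_cases hc : pvIsDigitA c
    · rw [if_neg (by simp [hc])]
      rw [show fr ++ digs ++ c :: t' = fr ++ (digs ++ [c]) ++ t' by simp,
          pvLenSnoc digs c fr.length,
          ih fr (digs ++ [c]) u host hS (pvAllSnoc hd hc)]
      simp [List.takeWhile_cons, hc]
    · rw [if_pos (by simp [hc])]
      rw [List.append_assoc, List.drop_left]
      simp [List.takeWhile_cons, hc]
  
theorem pvLoopA_p_some0 (t fr u : List Char) (host : Option (List Char)) (hS : Nat) :
    pvLoopA (fr ++ t) (t.length + 1) fr.length .mp hS fr.length (some u) host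
      = (some u, host, some (t.takeWhile pvIsDigitA)) := by
  have h := pvLoopA_p_some t fr [] u host hS (by simp)
  simpa using h

theorem pvLoopA_h (t : List Char) : ∀ (fr mid u : List Char)
    (host : Option (List Char)) (pS : Nat), (∀ c ∈ mid, c ≠ ':') →
    pvLoopA (fr ++ mid ++ t) (t.length + 1) (fr.length + mid.length) .mh fr.length pS (some u) host
      = (some u, some (mid ++ t.takeWhile (· ≠ ':')),
         if ':' ∈ t then some (((t.dropWhile (· ≠ ':')).tail).takeWhile pvIsDigitA) else none) := by
  induction t with
  | nil =>
    intro fr mid u host pS hm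
    rw [show ([] : List Char).length + 1 = 0 + 1 from rfl,
        pvStepNone_mh 0 fr.length pS _ host (pvGetNone _ _ (by simp))]
    simp [List.drop_left]
  | cons c t' ih =>
    intro fr mid u host pS hm
    have hget : (fr ++ mid ++ c :: t')[fr.length + mid.length]? = some c :=
      pvGetHead _ _ _ _ (by simp)
    rw [show (c :: t').length + 1 = t'.length + 1 + 1 from rfl,
        pvStepSome_mh (t'.length + 1) fr.length pS _ host hget]
    by_cases hc : c = ':'
    · subst hc
      rw [if_pos rfl]
      rw [List.append_assoc, List.drop_left,
          show fr.length + mid.length - fr.length = mid.length by omega, List.take_left]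
      rw [show fr ++ (mid ++ ':' :: t') = (fr ++ mid ++ [':']) ++ t' by simp,
          show fr.length + mid.length + 1 = (fr ++ mid ++ [':']).length by simp [Nat.add_assoc],
          pvLoopA_p_some0 t' (fr ++ mid ++ [':']) u (some mid) fr.length]
      simp [List.takeWhile_cons, List.dropWhile_cons]
    · rw [if_neg hc]
      rw [show fr ++ mid ++ c :: t' = fr ++ (mid ++ [c]) ++ t' by simp,
          pvLenSnoc mid c fr.length,
          ih fr (mid ++ [c]) u host pS (pvAllSnoc hm hc)]
      simp [List.takeWhile_cons, List.dropWhile_cons, hc, Ne.symm hc]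

theorem pvLoopA_h0 (t fr u : List Char) (host : Option (List Char)) (pS : Nat) :
    pvLoopA (fr ++ t) (t.length + 1) fr.length .mh fr.length pS (some u) host
      = (some u, some (t.takeWhile (· ≠ ':')),
         if ':' ∈ t then some (((t.dropWhile (· ≠ ':')).tail).takeWhile pvIsDigitA) else none) := by
  have h := pvLoopA_h t fr [] u host pS (by simp)
  simpa using h

theorem pvLoopA_u (t : List Char) : ∀ (pre : List Char) (hS pS : Nat),
    pvLoopA (pre ++ t) (t.length + 1) pre.length .mu hS pS none none = pvURes pre t := by
  induction t with
  | nil =>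
    intro pre hS pS
    rw [show ([] : List Char).length + 1 = 0 + 1 from rfl,
        pvStepNone_mu 0 hS pS none none (pvGetNone _ _ (by simp))]
    simp [pvURes]
  | cons c t' ih =>
    intro pre hS pS
    have hget : (pre ++ c :: t')[pre.length]? = some c := pvGetHead _ _ _ _ rfl
    rw [show (c :: t').length + 1 = t'.length + 1 + 1 from rfl,
        pvStepSome_mu (t'.length + 1) hS pS none none hget]
    by_cases hc : c = '@'
    · subst hc
      rw [if_pos rfl, List.take_left]
      rw [show pre ++ '@' :: t' = (pre ++ ['@']) ++ t' by simp,
          show pre.length + 1 = (pre ++ ['@']).length by simp,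
          pvLoopA_h0 t' (pre ++ ['@']) pre none pS]
      simp [pvURes, pvHRes, List.takeWhile_cons, List.dropWhile_cons]
    · rw [if_neg hc]
      rw [show pre ++ c :: t' = (pre ++ [c]) ++ t' by simp,
          show pre.length + 1 = (pre ++ [c]).length by simp,
          ih (pre ++ [c]) hS pS]
      simp [pvURes, List.takeWhile_cons, List.dropWhile_cons, hc, Ne.symm hc]

theorem pvLoopA_p_none (t : List Char) : ∀ (fr digs : List Char)
    (host : Option (List Char)) (hS : Nat), (∀ c ∈ digs, pvIsDigitA c) →
    pvLoopA (fr ++ digs ++ t) (t.length + 1) (fr.length + digs.length) .mp hS fr.length none host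
      = pvPRes fr digs t host := by
  induction t with
  | nil =>
    intro fr digs host hS hd
    rw [show ([] : List Char).length + 1 = 0 + 1 from rfl,
        pvStepNone_mp 0 hS fr.length none host (pvGetNone _ _ (by simp))]
    simp [pvPRes, List.drop_left]
  | cons c t' ih =>
    intro fr digs host hS hd
    have hget : (fr ++ digs ++ c :: t')[fr.length + digs.length]? = some c :=
      pvGetHead _ _ _ _ (by simp)
    rw [show (c :: t').length + 1 = t'.length + 1 + 1 from rfl,
        pvStepSome_mp_none (t'.length + 1) hS fr.length host hget]
    by_cases hat : c = '@'
    · subst hat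
      rw [if_pos rfl]
      rw [show (fr ++ digs ++ '@' :: t').take (fr.length + digs.length)
            = fr ++ digs by rw [← List.length_append, List.take_left]]
      rw [show fr ++ digs ++ '@' :: t' = (fr ++ digs ++ ['@']) ++ t' by simp,
          show fr.length + digs.length + 1 = (fr ++ digs ++ ['@']).length by simp [Nat.add_assoc],
          pvLoopA_h0 t' (fr ++ digs ++ ['@']) (fr ++ digs) none fr.length]
      simp [pvPRes, pvHRes, List.dropWhile_cons, pvIsDigitA_at]
    · rw [if_neg hat]
      by_cases hc : pvIsDigitA c
      · rw [if_neg (by simp [hc])]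
        rw [show fr ++ digs ++ c :: t' = fr ++ (digs ++ [c]) ++ t' by simp,
            pvLenSnoc digs c fr.length,
            ih fr (digs ++ [c]) host hS (pvAllSnoc hd hc)]
        simp only [pvPRes, List.dropWhile_cons, List.takeWhile_cons, hc, if_pos, ite_true]
        cases hdw : t'.dropWhile pvIsDigitA with
        | nil => simp
        | cons c2 r1 => by_cases hc2 : c2 = '@' <;> simp [hc2]
      · rw [if_pos (by simp [hc])]
        rw [show fr ++ digs ++ c :: t' = (fr ++ digs ++ [c]) ++ t' by simp,
            show fr.length + digs.length + 1 = (fr ++ digs ++ [c]).length by simp [Nat.add_assoc],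
            pvLoopA_u t' (fr ++ digs ++ [c]) hS fr.length]
        simp [pvPRes, List.dropWhile_cons, hc, hat]

theorem pvLoopA_p_none0 (t fr : List Char) (host : Option (List Char)) (hS : Nat) :
    pvLoopA (fr ++ t) (t.length + 1) fr.length .mp hS fr.length none host
      = pvPRes fr [] t host := by
  have h := pvLoopA_p_none t fr [] host hS (by simp)
  simpa using h

theorem pvLoopA_m0 (t : List Char) : ∀ (pre : List Char) (hS pS : Nat),
    pvLoopA (pre ++ t) (t.length + 1) pre.length .m0 hS pS none none = pvMRes pre t := by
  induction t with
  | nil =>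
    intro pre hS pS
    rw [show ([] : List Char).length + 1 = 0 + 1 from rfl,
        pvStepNone_m0 0 hS pS none none (pvGetNone _ _ (by simp))]
    simp [pvMRes]
  | cons c t' ih =>
    intro pre hS pS
    have hget : (pre ++ c :: t')[pre.length]? = some c := pvGetHead _ _ _ _ rfl
    rw [show (c :: t').length + 1 = t'.length + 1 + 1 from rfl,
        pvStepSome_m0 (t'.length + 1) hS pS none none hget]
    by_cases hat : c = '@'
    · subst hat
      rw [if_pos rfl, List.take_left]
      rw [show pre ++ '@' :: t' = (pre ++ ['@']) ++ t' by simp,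
          show pre.length + 1 = (pre ++ ['@']).length by simp,
          pvLoopA_h0 t' (pre ++ ['@']) pre none pS]
      simp [pvMRes, pvHRes, List.dropWhile_cons, pvP0]
    · by_cases hcol : c = ':'
      · subst hcol
        rw [if_neg hat, if_pos rfl, List.take_left]
        rw [show pre ++ ':' :: t' = (pre ++ [':']) ++ t' by simp,
            show pre.length + 1 = (pre ++ [':']).length by simp,
            pvLoopA_p_none0 t' (pre ++ [':']) (some pre) hS]
        simp [pvMRes, List.dropWhile_cons, pvP0]
      · rw [if_neg hat, if_neg hcol]
        rw [show pre ++ c :: t' = (pre ++ [c]) ++ t' by simp,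
            show pre.length + 1 = (pre ++ [c]).length by simp,
            ih (pre ++ [c]) hS pS]
        have hp0 : pvP0 c = true := by simp [pvP0, hat, hcol]
        simp only [pvMRes, List.dropWhile_cons, List.takeWhile_cons, hp0, if_pos, ite_true]
        cases hdw : t'.dropWhile pvP0 with
        | nil => simp
        | cons c2 r => by_cases hc2 : c2 = '@' <;> simp [hc2, pvPRes]

-- digits are neither '@' nor ':'
theorem pvDigitNeAt {x : Char} (h : pvIsDigitA x = true) : x ≠ '@' := by
  intro e; subst e; rw [pvIsDigitA_at] at h; exact Bool.false_ne_true h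

-- the head of a non-empty dropWhile fails the predicate
theorem pvDropHead {p : Char → Bool} {l r : List Char} {c : Char}
    (h : l.dropWhile p = c :: r) : p c = false := by
  have h2 := List.head?_dropWhile_not p l
  rw [h] at h2
  simpa using h2

-- s.split(sep, 1) on a list that contains sep exactly where shown
theorem pvSplitOnce_eq (c : Char) (w r : List Char) (hw : ∀ x ∈ w, x ≠ c) :
    pvSplitOnce c (w ++ c :: r) = (w, r) := by
  unfold pvSplitOnce
  rw [List.takeWhile_append_of_pos (by intro a ha; simpa using hw a ha),
      List.dropWhile_append_of_pos (by intro a ha; simpa using hw a ha)]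
  simp

theorem pvTakeWhileNe (c : Char) (l : List Char) (h : c ∉ l) :
    l.takeWhile (fun x => !decide (x = c)) = l :=
  List.takeWhile_eq_self_iff.mpr (fun a ha => by
    simp only [Bool.not_eq_eq_eq_not, Bool.not_true, decide_eq_false_iff_not]
    intro e; exact h (e ▸ ha))

-- ===== VERDICT (by name: the statement is the Claim_ definition above) =====
theorem SplitServer_spec : Claim_equal_SplitServer := by
  intro authority _
  unfold Spec_SplitServer
  cases authority with
  | none => rfl
  | some a =>
    by_cases he : a.toList = []
    · simp [SplitServer, SplitServer_alt, he]
    · have hA := pvLoopA_m0 a.toList [] 0 0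
      simp only [List.nil_append, List.length_nil] at hA
      simp only [SplitServer, SplitServer_alt, if_neg he, hA]
      generalize a.toList = s at he ⊢
      have hsplit : s.takeWhile pvP0 ++ s.dropWhile pvP0 = s := List.takeWhile_append_dropWhile
      have hwP : ∀ x ∈ s.takeWhile pvP0, pvP0 x := fun x hx => List.mem_takeWhile_imp hx
      have hwAt : ∀ x ∈ s.takeWhile pvP0, x ≠ '@' := by
        intro x hx; have h := hwP x hx; simp [pvP0] at h; exact h.1
      have hwCol : ∀ x ∈ s.takeWhile pvP0, x ≠ ':' := by
        intro x hx; have h := hwP x hx; simp [pvP0] at h; exact h.2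
      set w := s.takeWhile pvP0 with hw
      cases hdd : s.dropWhile pvP0 with
      | nil =>
        rw [hdd, List.append_nil] at hsplit
        have hAt : ¬ ('@' : Char) ∈ s := fun hm => hwAt '@' (hsplit ▸ hm) rfl
        have hCol : ¬ (':' : Char) ∈ s := fun hm => hwCol ':' (hsplit ▸ hm) rfl
        simp only [pvMRes, hdd]
        simp [hAt, hCol]
      | cons c r =>
        have hseq : s = w ++ c :: r := by rw [← hsplit, hdd]
        have hcP : pvP0 c = false := pvDropHead hdd
        simp only [pvMRes, hdd, List.nil_append]
        rw [← hw]
        by_cases hcat : c = '@'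
        · subst hcat
          rw [if_pos rfl, hseq]
          rw [if_pos (by simp : ('@' : Char) ∈ w ++ '@' :: r)]
          rw [pvSplitOnce_eq '@' w r hwAt]
          by_cases hcolr : ':' ∈ r
          · simp [pvHRes, pvSplitOnce, pvDigitPrefix_eq, hcolr]
          · simp [pvHRes, hcolr, pvTakeWhileNe ':' r hcolr]
        · have hccol : c = ':' := by
            by_contra hne
            have h : pvP0 c = true := by simp [pvP0, hcat, hne]
            rw [hcP] at h; exact Bool.false_ne_true h
          subst hccol
          rw [if_neg hcat]
          cases hdd2 : r.dropWhile pvIsDigitA with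
          | nil =>
            have hrd : ∀ x ∈ r, pvIsDigitA x := List.dropWhile_eq_nil_iff.mp hdd2
            simp only [pvPRes, hdd2, List.nil_append]
            have hnoat : ¬ ('@' : Char) ∈ s := by
              rw [hseq]
              simp only [List.mem_append, List.mem_cons, not_or]
              refine ⟨fun hm => hwAt '@' hm rfl, by decide, fun hm => pvDigitNeAt (hrd '@' hm) rfl⟩
            have hcolmem : (':' : Char) ∈ s := by rw [hseq]; simp
            rw [if_neg hnoat, if_pos hcolmem, hseq, pvSplitOnce_eq ':' w r hwCol]
            have hall : r.all pvIsDigitB = true := by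
              rw [List.all_eq_true]; intro x hx; rw [pvIsDigit_eq]; exact hrd x hx
            simp [hall]
          | cons c2 r1 =>
            have hc2 : pvIsDigitA c2 = false := pvDropHead hdd2
            have hrsplit : r = r.takeWhile pvIsDigitA ++ c2 :: r1 := by
              conv_lhs => rw [← List.takeWhile_append_dropWhile (p := pvIsDigitA) (l := r)]
              rw [hdd2]
            have hdm : ∀ x ∈ r.takeWhile pvIsDigitA, pvIsDigitA x :=
              fun x hx => List.mem_takeWhile_imp hx
            set d := r.takeWhile pvIsDigitA with hdw
            simp only [pvPRes, hdd2, List.nil_append]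
            rw [← hdw]
            by_cases hc2at : c2 = '@'
            · subst hc2at
              rw [if_pos rfl, hseq,
                  show w ++ ':' :: r = (w ++ ':' :: d) ++ '@' :: r1 by rw [hrsplit]; simp]
              rw [if_pos (by simp : ('@' : Char) ∈ (w ++ ':' :: d) ++ '@' :: r1)]
              rw [pvSplitOnce_eq '@' (w ++ ':' :: d) r1 (by
                    intro x hx
                    rcases List.mem_append.1 hx with h | h
                    · exact hwAt x h
                    · rcases List.mem_cons.1 h with h' | h'
                      · subst h'; decide
                      · exact pvDigitNeAt (hdm x h'))]
              by_cases hcolr1 : ':' ∈ r1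
              · simp [pvHRes, pvSplitOnce, pvDigitPrefix_eq, hcolr1]
              · simp [pvHRes, hcolr1, pvTakeWhileNe ':' r1 hcolr1]
            · rw [if_neg hc2at]
              by_cases hat1 : '@' ∈ r1
              · simp only [pvURes, if_pos hat1]
                rcases hdw4 : r1.dropWhile (· ≠ '@') with _ | ⟨c4, rr⟩
                · exfalso
                  have := List.dropWhile_eq_nil_iff.mp hdw4 '@' hat1
                  simp at this
                · have hc4 : c4 = '@' := by
                    have := pvDropHead hdw4; simpa using this
                  subst hc4
                  have hr1 : r1 = r1.takeWhile (· ≠ '@') ++ '@' :: rr := by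
                    conv_lhs => rw [← List.takeWhile_append_dropWhile (p := (· ≠ '@')) (l := r1)]
                    rw [hdw4]
                  have htkm : ∀ x ∈ r1.takeWhile (· ≠ '@'), x ≠ '@' :=
                    fun x hx => by simpa using List.mem_takeWhile_imp hx
                  rw [hseq,
                      show w ++ ':' :: r = (w ++ ':' :: (d ++ c2 :: r1.takeWhile (· ≠ '@'))) ++ '@' :: rr by
                        rw [hrsplit]; conv_lhs => rw [hr1]
                        simp]
                  rw [if_pos (by simp : ('@' : Char) ∈ (w ++ ':' :: (d ++ c2 :: r1.takeWhile (· ≠ '@'))) ++ '@' :: rr)]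
                  rw [pvSplitOnce_eq '@' _ rr (by
                        intro x hx
                        rcases List.mem_append.1 hx with h | h
                        · exact hwAt x h
                        · rcases List.mem_cons.1 h with h' | h'
                          · subst h'; decide
                          · rcases List.mem_append.1 h' with h'' | h''
                            · exact pvDigitNeAt (hdm x h'')
                            · rcases List.mem_cons.1 h'' with h3 | h3
                              · subst h3; exact hc2at
                              · exact htkm x h3)]
                  by_cases hcolrr : ':' ∈ (('@' :: rr : List Char)).tail
                  · simp only [List.tail_cons] at hcolrr ⊢
                    simp [pvHRes, pvSplitOnce, pvDigitPrefix_eq, hcolrr]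
                  · simp only [List.tail_cons] at hcolrr ⊢
                    simp [pvHRes, hcolrr, pvTakeWhileNe ':' rr hcolrr]
              · simp only [pvURes, if_neg hat1]
                have hnoat : ¬ ('@' : Char) ∈ s := by
                  rw [hseq, hrsplit]
                  simp only [List.mem_append, List.mem_cons, not_or]
                  exact ⟨fun hm => hwAt '@' hm rfl, by decide,
                         fun hm => pvDigitNeAt (hdm '@' hm) rfl, Ne.symm hc2at, hat1⟩
                have hcolmem : (':' : Char) ∈ s := by rw [hseq]; simp
                rw [if_neg hnoat, if_pos hcolmem]
                rw [show s = w ++ ':' :: r from hseq, pvSplitOnce_eq ':' w r hwCol]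
                have hallf : ¬ (r.all pvIsDigitB = true) := by
                  intro hall
                  have hm : c2 ∈ r := by rw [hrsplit]; simp
                  have := List.all_eq_true.mp hall c2 hm
                  rw [pvIsDigit_eq, hc2] at this
                  exact Bool.false_ne_true this
                rw [if_neg hallf]
                simp [hrsplit]
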